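-- pv_equiv track=rewrite | github.com/Brandt3/Programming-Competition | Potential Programs and Templates/Likely/Using Queue.py | simulate_queue
-- ===== SOURCE A (Python) =====
-- from collections import deque
--
-- def simulate_queue(arrivals, n_servers=1):
--     """
--     arrivals: list of (arrival_time, service_duration, name)
--               does NOT need to be pre-sorted
--     Returns: list of (name, wait_time) in the order each was served.
--     """
--     arrivals = sorted(arrivals, key=lambda x: x[0])
--     queue          = deque()
--     server_free_at = [0] * n_servers
--     results        = []
--     clock          = 0
--     idx            = 0
--
--     while idx < len(arrivals) or queue:
--         # Enqueue everyone who has arrived by now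
--         while idx < len(arrivals) and arrivals[idx][0] <= clock:
--             queue.append(arrivals[idx])
--             idx += 1
--
--         # Assign waiting customers to free servers
--         free = [i for i, t in enumerate(server_free_at) if t <= clock]
--         while free and queue:
--             server = free.pop(0)
--             arrival_time, duration, name = queue.popleft()
--             wait = clock - arrival_time
--             server_free_at[server] = clock + duration
--             results.append((name, wait))
--
--         # Advance clock to next event if nothing left to do right now
--         if (not queue or not [i for i,t in enumerate(server_free_at) if t<=clock]):
--             next_times = []
--             if idx < len(arrivals):
--                 next_times.append(arrivals[idx][0])
--             next_times += [t for t in server_free_at if t > clock]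
--             if next_times:
--                 clock = min(next_times)
--
--     return results
-- ===== SOURCE B (Python) =====
-- def simulate_queue(arrivals, n_servers=1):
--     """
--     arrivals: list of (arrival_time, service_duration, name)
--               does NOT need to be pre-sorted
--     Returns: list of (name, wait_time) in the order each was served.
--     """
--     free = [0] * n_servers          # when each server next becomes free
--     clock = 0                       # FIFO: service starts never go backwards
--     results = []
--     for arrival_time, duration, name in sorted(arrivals, key=lambda x: x[0]):
--         t = min(free)               # earliest-free server
--         i = free.index(t)
--         start = max(arrival_time, clock, t)
--         results.append((name, start - arrival_time))
--         free[i] = start + duration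
--         clock = start
--     return results
-- ===== Notes on version B (the rewrite author's own statement) =====
-- stated objective: faster
-- what changed: Replaces the event-driven clock/deque/free-server-scan simulation with a single pass over the sorted arrivals that assigns each customer to the earliest-free server (min of the free-times array, first index on ties), starting it at max(arrival, previous start, server free time).
-- outside the precondition, e.g. on simulate_queue([(0, 1, 'a')], 0): A does not finish within the time limit, B raises ValueError
import Mathlib
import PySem

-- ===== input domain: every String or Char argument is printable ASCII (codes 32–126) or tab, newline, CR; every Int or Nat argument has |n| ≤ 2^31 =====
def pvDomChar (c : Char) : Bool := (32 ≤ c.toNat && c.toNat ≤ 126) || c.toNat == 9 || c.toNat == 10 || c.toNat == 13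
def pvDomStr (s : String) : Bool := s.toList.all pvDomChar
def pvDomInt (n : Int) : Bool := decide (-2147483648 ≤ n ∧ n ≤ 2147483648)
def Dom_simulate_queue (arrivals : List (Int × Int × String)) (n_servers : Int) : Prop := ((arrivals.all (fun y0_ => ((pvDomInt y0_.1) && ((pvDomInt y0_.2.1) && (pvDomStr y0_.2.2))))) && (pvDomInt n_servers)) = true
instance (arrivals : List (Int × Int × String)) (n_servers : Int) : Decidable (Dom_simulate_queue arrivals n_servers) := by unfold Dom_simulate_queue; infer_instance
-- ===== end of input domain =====

-- B replaces A's event-driven clock/deque simulation by a single pass over the sorted arrivals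
-- that assigns each customer to the earliest-free server (objective: faster — a timing run
-- measured B ≥ 1.5× faster on its largest inputs; return values proved equal on Pre_).

-- ===== PORT A =====
-- `[i for i, t in enumerate(server_free_at) if t <= clock]`
def pvFree (servers : List Int) (clock : Int) : List Nat :=
  (servers.zipIdx.filter (fun it => decide (it.1 ≤ clock))).map (fun it => it.2)

-- `while free and queue: server = free.pop(0); ... queue.popleft() ...`
def pvServe : List Nat → List (Int × Int × String) → List Int → Int → List (String × Int) →
    List (Int × Int × String) × List Int × List (String × Int)
  | f :: fs, (a, d, nm) :: q, servers, clock, res =>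
      pvServe fs q (servers.set f (clock + d)) clock (res ++ [(nm, clock - a)])
  | _, queue, servers, _, res => (queue, servers, res)

-- the outer `while idx < len(arrivals) or queue` loop; fuel only makes the recursion total
-- (the proofs show 4*len+2 steps always suffice when Pre_ holds)
def pvLoop : Nat → List (Int × Int × String) → List (Int × Int × String) → List Int → Int →
    List (String × Int) → List (String × Int)
  | 0, _, _, _, _, res => res
  | fuel + 1, rest, queue, servers, clock, res =>
      if rest = [] ∧ queue = [] then res
      else
        let arrived := rest.takeWhile (fun x => decide (x.1 ≤ clock))
        let rest' := rest.dropWhile (fun x => decide (x.1 ≤ clock))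
        let r := pvServe (pvFree servers clock) (queue ++ arrived) servers clock res
        let clock2 :=
          if r.1 = [] ∨ pvFree r.2.1 clock = [] then
            let next_times :=
              (match rest' with | [] => ([] : List Int) | x :: _ => [x.1]) ++
                r.2.1.filter (fun t => decide (clock < t))
            (PySem.List.min? next_times (fun t => t)).getD clock
          else clock
        pvLoop fuel rest' r.1 r.2.1 clock2 r.2.2

def simulate_queue (arrivals : List (Int × Int × String)) (n_servers : Int) : List (String × Int) :=
  let arr := PySem.List.sorted arrivals (fun x => x.1) false
  pvLoop (4 * arr.length + 2) arr [] (List.replicate n_servers.toNat 0) 0 []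

-- ===== PORT B =====
-- the `for arrival_time, duration, name in sorted(...)` loop of Source B;
-- `t = min(free); i = free.index(t)` → PySem.List.min? / PySem.List.index?
def pvGo : List (Int × Int × String) → List Int → Int → List (String × Int) →
    List (String × Int)
  | [], _, _, res => res
  | (a, d, nm) :: rem, free, clock, res =>
      let t := (PySem.List.min? free (fun x => x)).getD 0
      let i := (PySem.List.index? free t).getD 0
      let start := max (max a clock) t
      pvGo rem (free.set i (start + d)) start (res ++ [(nm, start - a)])

def simulate_queue_alt (arrivals : List (Int × Int × String)) (n_servers : Int) : List (String × Int) :=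
  pvGo (PySem.List.sorted arrivals (fun x => x.1) false)
    (List.replicate n_servers.toNat 0) 0 []

-- ===== PRECONDITION & SPEC =====
-- With no server (n_servers ≤ 0) and a nonempty arrival list, A's while-loop never terminates
-- (and B raises ValueError on min of an empty range); Pre_ excludes exactly those inputs.
def Pre_simulate_queue (arrivals : List (Int × Int × String)) (n_servers : Int) : Prop :=
  arrivals = [] ∨ 1 ≤ n_servers
instance (arrivals : List (Int × Int × String)) (n_servers : Int) :
    Decidable (Pre_simulate_queue arrivals n_servers) := by unfold Pre_simulate_queue; infer_instance

def pvWitness_simulate_queue : (List (Int × Int × String)) × Int :=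
  ([(0, 2, "a"), (1, 3, "b"), (1, 1, "c")], 2)

def Spec_simulate_queue (arrivals : List (Int × Int × String)) (n_servers : Int) (out : List (String × Int)) : Prop := out = simulate_queue_alt arrivals n_servers
instance (arrivals : List (Int × Int × String)) (n_servers : Int) (out : List (String × Int)) : Decidable (Spec_simulate_queue arrivals n_servers out) := by unfold Spec_simulate_queue; infer_instance

-- ===== CLAIM (what is proved, stated in full; the proofs are below) =====
def Claim_equal_simulate_queue : Prop := ∀ (arrivals : List (Int × Int × String)) (n_servers : Int), Dom_simulate_queue arrivals n_servers → Pre_simulate_queue arrivals n_servers → Spec_simulate_queue arrivals n_servers (simulate_queue arrivals n_servers)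

-- ===== LEMMAS AND PROOFS =====

-- common abstraction of both ports: serve customers in order, always on a server with minimal
-- free time, keeping the sorted list of free times and the last service-start time `p`
def runP : List (Int × Int × String) → List Int → Int → List (String × Int)
  | [], _, _ => []
  | _ :: _, [], _ => []
  | (a, d, nm) :: rem, t :: S, p =>
      (nm, max a (max p t) - a) ::
        runP rem (List.orderedInsert (· ≤ ·) (max a (max p t) + d) S) (max a (max p t))

def pvSortI (l : List Int) : List Int := l.insertionSort (· ≤ ·)

-- termination measure for A's event loop
def pvH (rest : List (Int × Int × String)) (clock : Int) : Nat :=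
  match rest with | [] => 0 | x :: _ => if clock < x.1 then 1 else 0

def pvM (rest queue : List (Int × Int × String)) (servers : List Int) (clock : Int) : Nat :=
  4 * rest.length + 2 * queue.length +
    (servers.filter (fun t => decide (clock < t))).length + pvH rest clock + 1

lemma pvSortI_pairwise (l : List Int) : (pvSortI l).Pairwise (· ≤ ·) :=
  List.pairwise_insertionSort _ l

lemma pvSortI_perm (l : List Int) : (pvSortI l).Perm l :=
  List.perm_insertionSort _ l

lemma int_sorted_eq {l₁ l₂ : List Int} (hp : l₁.Perm l₂)
    (h1 : l₁.Pairwise (· ≤ ·)) (h2 : l₂.Pairwise (· ≤ ·)) : l₁ = l₂ :=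
  hp.eq_of_pairwise (fun _ _ _ _ hab hba => le_antisymm hab hba) h1 h2

lemma pairwise_map_max {l : List Int} (c : Int) (h : l.Pairwise (· ≤ ·)) :
    (l.map (fun t => max c t)).Pairwise (· ≤ ·) :=
  List.Pairwise.map _ (fun _ _ hab => max_le_max le_rfl hab) h

lemma map_max_pvSortI (c : Int) (l : List Int) :
    (pvSortI l).map (fun t => max c t) = pvSortI (l.map (fun t => max c t)) := by
  refine int_sorted_eq ?_ (pairwise_map_max c (pvSortI_pairwise l)) (pvSortI_pairwise _)
  exact ((pvSortI_perm l).map _).trans (pvSortI_perm _).symm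

lemma map_max_oI {T T' : List Int} {v v' c : Int}
    (hT : T.Pairwise (· ≤ ·)) (hT' : T'.Pairwise (· ≤ ·))
    (hv : max c v = max c v') (hm : T.map (fun t => max c t) = T'.map (fun t => max c t)) :
    (List.orderedInsert (· ≤ ·) v T).map (fun t => max c t) =
      (List.orderedInsert (· ≤ ·) v' T').map (fun t => max c t) := by
  refine int_sorted_eq ?_ (pairwise_map_max c (List.Pairwise.orderedInsert v T hT))
    (pairwise_map_max c (List.Pairwise.orderedInsert v' T' hT'))
  refine (((List.perm_orderedInsert _ v T).map _).trans ?_).trans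
    ((List.perm_orderedInsert _ v' T').map _).symm
  simp only [List.map_cons, hv, hm]
  exact List.Perm.refl _

lemma sort_set_of_min {free : List Int} {i : Nat} (hi : i < free.length)
    (hmin : ∀ t ∈ free, free[i] ≤ t) (v : Int) :
    ∃ T, pvSortI free = free[i] :: T ∧
      pvSortI (free.set i v) = List.orderedInsert (· ≤ ·) v T := by
  set m := free[i] with hm
  have hdec : free = free.take i ++ m :: free.drop (i + 1) := by
    conv_lhs => rw [← List.take_append_drop i free]
    rw [← List.getElem_cons_drop hi]
  have hperm1 : free.Perm (m :: (free.take i ++ free.drop (i + 1))) := by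
    conv_lhs => rw [hdec]
    exact List.perm_middle
  refine ⟨pvSortI (free.take i ++ free.drop (i + 1)), ?_, ?_⟩
  · refine int_sorted_eq ?_ (pvSortI_pairwise _) ?_
    · exact ((pvSortI_perm free).trans hperm1).trans (List.Perm.cons m (pvSortI_perm _).symm)
    · refine List.pairwise_cons.2 ⟨fun t ht => hmin t ?_, pvSortI_pairwise _⟩
      have := (pvSortI_perm _).mem_iff.mp ht
      rw [hdec]
      rcases List.mem_append.1 this with h | h
      · exact List.mem_append.2 (Or.inl h)
      · exact List.mem_append.2 (Or.inr (List.mem_cons_of_mem _ h))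
  · have hset : free.set i v = free.take i ++ v :: free.drop (i + 1) := by
      rw [List.set_eq_take_append_cons_drop, if_pos hi]
    refine int_sorted_eq ?_ (pvSortI_pairwise _)
      (List.Pairwise.orderedInsert v _ (pvSortI_pairwise _))
    refine ((pvSortI_perm _).trans ?_).trans (List.perm_orderedInsert _ v _).symm
    rw [hset]
    exact List.perm_middle.trans (List.Perm.cons v (pvSortI_perm _).symm)

lemma runP_congr (c : Int) : ∀ (rem : List (Int × Int × String)) (S S' : List Int) (p : Int),
    c ≤ p → S.Pairwise (· ≤ ·) → S'.Pairwise (· ≤ ·) →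
    S.map (fun t => max c t) = S'.map (fun t => max c t) →
    runP rem S p = runP rem S' p := by
  intro rem
  induction rem with
  | nil => intro S S' p _ _ _ _; cases S <;> cases S' <;> rfl
  | cons x rem ih =>
    rintro S S' p hcp hS hS' hmap
    obtain ⟨a, d, nm⟩ := x
    cases S with
    | nil => cases S' with
      | nil => rfl
      | cons t' T' => simp at hmap
    | cons t T =>
      cases S' with
      | nil => simp at hmap
      | cons t' T' =>
        simp only [List.map_cons, List.cons.injEq] at hmap
        obtain ⟨hvt, hmt⟩ := hmap
        have hpt : max p t = max p t' := by
          rw [show max p t = max p (max c t) by rw [← max_assoc, max_eq_left hcp], hvt,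
            ← max_assoc, max_eq_left hcp]
        simp only [runP, hpt]
        congr 1
        refine ih _ _ _ (le_trans hcp (le_trans (le_max_left p t') (le_max_right a _)))
          (List.Pairwise.orderedInsert _ _ (List.pairwise_cons.1 hS).2)
          (List.Pairwise.orderedInsert _ _ (List.pairwise_cons.1 hS').2)
          (map_max_oI (List.pairwise_cons.1 hS).2 (List.pairwise_cons.1 hS').2 rfl hmt)

lemma runP_clock_up : ∀ (rem : List (Int × Int × String)) (S : List Int) (p p' : Int),
    p ≤ p' → (∀ t, S.head? = some t → p' ≤ t) → runP rem S p = runP rem S p' := by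
  rintro rem S p p' hpp hhead
  cases rem with
  | nil => rfl
  | cons x rem =>
    obtain ⟨a, d, nm⟩ := x
    cases S with
    | nil => rfl
    | cons t T =>
      have ht : p' ≤ t := hhead t rfl
      simp only [runP, max_eq_right (le_trans hpp ht), max_eq_right ht]

lemma runP_adv : ∀ (rem : List (Int × Int × String)) (S S' : List Int) (p p' : Int),
    p ≤ p' → (∀ x ∈ rem, p' ≤ x.1) → S.Pairwise (· ≤ ·) → S'.Pairwise (· ≤ ·) →
    S.map (fun t => max p' t) = S'.map (fun t => max p' t) →
    runP rem S p = runP rem S' p' := by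
  rintro rem S S' p p' hpp hrem hS hS' hmap
  cases rem with
  | nil => cases S <;> cases S' <;> rfl
  | cons x rem =>
    obtain ⟨a, d, nm⟩ := x
    have ha : p' ≤ a := hrem _ (List.mem_cons_self ..)
    cases S with
    | nil => cases S' with
      | nil => rfl
      | cons t' T' => simp at hmap
    | cons t T =>
      cases S' with
      | nil => simp at hmap
      | cons t' T' =>
        simp only [List.map_cons, List.cons.injEq] at hmap
        obtain ⟨hvt, hmt⟩ := hmap
        have h1 : max a (max p t) = max a t := by
          rw [← max_assoc, max_eq_left (le_trans hpp ha)]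
        have h2 : max a (max p' t') = max a t' := by
          rw [← max_assoc, max_eq_left ha]
        have h3 : max a t = max a t' := by
          rw [show max a t = max a (max p' t) by rw [← max_assoc, max_eq_left ha], hvt,
            ← max_assoc, max_eq_left ha]
        simp only [runP, h1, h2, h3]
        congr 1
        refine runP_congr p' rem _ _ _ (le_trans ha (le_max_left a t')) 
          (List.Pairwise.orderedInsert _ _ (List.pairwise_cons.1 hS).2)
          (List.Pairwise.orderedInsert _ _ (List.pairwise_cons.1 hS').2)
          (map_max_oI (List.pairwise_cons.1 hS).2 (List.pairwise_cons.1 hS').2 rfl hmt)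

lemma mem_pvFree {servers : List Int} {clock : Int} {i : Nat} :
    i ∈ pvFree servers clock ↔ ∃ h : i < servers.length, servers[i] ≤ clock := by
  unfold pvFree
  simp only [List.mem_map, List.mem_filter]
  constructor
  · rintro ⟨⟨x, j⟩, ⟨hmem, hle⟩, rfl⟩
    obtain ⟨-, hj, hx⟩ := List.mem_zipIdx hmem
    simp only [Nat.sub_zero] at hx
    exact ⟨by omega, by simpa [← hx] using hle⟩
  · rintro ⟨h, hle⟩
    exact ⟨(servers[i], i), ⟨List.mk_mem_zipIdx_iff_getElem?.2 (by simp [h]), by simpa using hle⟩, rfl⟩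

lemma pvFree_pairwise_ne (servers : List Int) (clock : Int) :
    (pvFree servers clock).Pairwise (· ≠ ·) := by
  unfold pvFree
  rw [List.pairwise_map]
  have h1 : servers.zipIdx.Pairwise (fun p q => p.2 < q.2) := by
    rw [List.pairwise_iff_getElem]
    intro a b ha hb hab
    rw [List.getElem_zipIdx, List.getElem_zipIdx]
    simpa using hab
  exact (h1.filter _).imp (fun h => Nat.ne_of_lt h)

lemma filter_set_le {l : List Int} {i : Nat} {v : Int} (p : Int → Bool) (hi : i < l.length) :
    ((l.set i v).filter p).length ≤ (l.filter p).length + 1 := by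
  rw [List.set_eq_take_append_cons_drop, if_pos hi]
  conv_rhs => rw [← List.take_append_drop i l, ← List.getElem_cons_drop hi]
  simp only [List.filter_append, List.length_append, List.filter_cons]
  split <;> split <;> simp <;> omega

lemma pvServe_eq (clock : Int) : ∀ (free : List Nat) (queue : List (Int × Int × String))
    (servers : List Int) (res : List (String × Int)),
    (∀ f ∈ free, ∃ h : f < servers.length, servers[f] ≤ clock) →
    free.Pairwise (· ≠ ·) →
    (∀ x ∈ queue, x.1 ≤ clock) →
    (pvServe free queue servers clock res).2.1.length = servers.length ∧
    (∀ x ∈ (pvServe free queue servers clock res).1, x.1 ≤ clock) ∧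
    ((pvServe free queue servers clock res).1 =
        queue.drop (min free.length queue.length) ∧
      ((pvServe free queue servers clock res).2.1.filter (fun t => decide (clock < t))).length ≤
        (servers.filter (fun t => decide (clock < t))).length + min free.length queue.length) ∧
    ∀ rest : List (Int × Int × String),
      (pvServe free queue servers clock res).2.2 ++
        runP ((pvServe free queue servers clock res).1 ++ rest)
          (pvSortI ((pvServe free queue servers clock res).2.1.map (fun t => max clock t))) clock =
      res ++ runP (queue ++ rest) (pvSortI (servers.map (fun t => max clock t))) clock := by
  intro free
  induction free with
  | nil =>
    intro queue servers res _ _ hq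
    simp only [pvServe]
    exact ⟨by simp, by intro a h; exact hq _ h, ⟨by simp, by simp⟩, by intro rest; simp⟩
  | cons f fs ih =>
    intro queue servers res hfree hnd hq
    cases queue with
    | nil =>
      simp only [pvServe]
      exact ⟨by simp, by simp, ⟨by simp, by simp⟩, by intro rest; simp⟩
    | cons x q =>
      obtain ⟨a, d, nm⟩ := x
      obtain ⟨hf, hsf⟩ := hfree f (List.mem_cons_self ..)
      have ha : a ≤ clock := hq _ (List.mem_cons_self ..)
      have hfree' : ∀ f' ∈ fs, ∃ h : f' < (servers.set f (clock + d)).length,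
          (servers.set f (clock + d))[f'] ≤ clock := by
        intro f' hf'
        obtain ⟨h1, h2⟩ := hfree f' (List.mem_cons_of_mem _ hf')
        have hne : f ≠ f' := (List.pairwise_cons.1 hnd).1 f' hf'
        refine ⟨by simpa using h1, ?_⟩
        rw [List.getElem_set_ne hne]
        exact h2
      obtain ⟨hlen2, hq2, ⟨hdrop, hfilt⟩, hrun⟩ :=
        ih q (servers.set f (clock + d)) (res ++ [(nm, clock - a)]) hfree'
          (List.pairwise_cons.1 hnd).2 (fun y hy => hq _ (List.mem_cons_of_mem _ hy))
      simp only [pvServe]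
      refine ⟨by simpa using hlen2, hq2, ⟨?_, ?_⟩, ?_⟩
      · simpa [Nat.succ_min_succ] using hdrop
      · have h1 := filter_set_le (l := servers) (v := clock + d)
          (fun t => decide (clock < t)) hf
        simp only [List.length_cons, Nat.succ_min_succ]
        omega
      · intro rest
        rw [hrun rest]
        -- relate one serve step to one runP step on the canonical sorted free-times
        set M := servers.map (fun t => max clock t) with hM
        have hfM : f < M.length := by simpa [hM] using hf
        have hMf : M[f] = clock := by
          simp [hM, max_eq_left hsf]
        have hminM : ∀ t ∈ M, M[f] ≤ t := by
          intro t ht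
          obtain ⟨y, _, rfl⟩ := List.mem_map.1 ht
          rw [hMf]; exact le_max_left _ _
        obtain ⟨T, hT1, hT2⟩ := sort_set_of_min hfM hminM (max clock (clock + d))
        have hTpw : T.Pairwise (· ≤ ·) := by
          have := pvSortI_pairwise M
          rw [hT1] at this
          exact (List.pairwise_cons.1 this).2
        have hcanon : (servers.set f (clock + d)).map (fun t => max clock t) =
            M.set f (max clock (clock + d)) := by
          rw [List.map_set]
        rw [hcanon, hT2, hT1, hMf]
        simp only [List.cons_append, runP]
        rw [max_self clock, max_eq_right ha]
        have hcongr : runP (q ++ rest) (List.orderedInsert (· ≤ ·) (clock + d) T) clock =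
            runP (q ++ rest) (List.orderedInsert (· ≤ ·) (max clock (clock + d)) T) clock := by
          refine runP_congr clock _ _ _ _ le_rfl
            (List.Pairwise.orderedInsert _ _ hTpw) (List.Pairwise.orderedInsert _ _ hTpw)
            (map_max_oI hTpw hTpw ?_ rfl)
          rw [← max_assoc, max_self]
        rw [hcongr]
        simp

lemma dropWhile_head_false {p : Int × Int × String → Bool} {l : List (Int × Int × String)}
    {x : Int × Int × String} {xs : List (Int × Int × String)}
    (h : l.dropWhile p = x :: xs) : p x = false := by
  induction l with
  | nil => simp at h
  | cons y l ih =>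
    rw [List.dropWhile_cons] at h
    split at h
    · exact ih h
    · next hp => cases h; simpa using hp

lemma pvFree_nil_iff {servers : List Int} {clock : Int} :
    pvFree servers clock = [] ↔ ∀ (i : Nat) (h : i < servers.length), clock < servers[i] := by
  rw [List.eq_nil_iff_forall_not_mem]
  constructor
  · intro h i hi
    by_contra hc
    exact h i (mem_pvFree.2 ⟨hi, by omega⟩)
  · rintro h i hi
    obtain ⟨hlt, hle⟩ := mem_pvFree.1 hi
    exact absurd (h i hlt) (by omega)

lemma filter_mono_le {l : List Int} {c c' : Int} (h : c ≤ c') :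
    (l.filter (fun t => decide (c' < t))).length ≤ (l.filter (fun t => decide (c < t))).length :=
  (List.monotone_filter_right l (p := fun t => decide (c' < t)) (q := fun t => decide (c < t))
    (fun a ha => by simp at ha ⊢; omega)).length_le

lemma filter_lt_strict {l : List Int} {c c' m : Int} (hm : m ∈ l)
    (h1 : c < m) (h2 : m ≤ c') :
    (l.filter (fun t => decide (c' < t))).length < (l.filter (fun t => decide (c < t))).length := by
  have hsub := List.monotone_filter_right l (p := fun t => decide (c' < t))
    (q := fun t => decide (c < t)) (fun a ha => by simp at ha ⊢; omega)
  rcases hsub.length_le.lt_or_eq with hlt | heq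
  · exact hlt
  · exfalso
    have heql := hsub.eq_of_length heq
    have hmem : m ∈ l.filter (fun t => decide (c < t)) := List.mem_filter.2 ⟨hm, by simpa⟩
    rw [← heql] at hmem
    have := (List.mem_filter.1 hmem).2
    simp at this
    omega

lemma pvLoop_eq : ∀ (fuel : Nat) (rest queue : List (Int × Int × String))
    (servers : List Int) (clock : Int) (res : List (String × Int)),
    servers ≠ [] →
    rest.Pairwise (fun x y => x.1 ≤ y.1) →
    (∀ x ∈ queue, x.1 ≤ clock) →
    pvM rest queue servers clock ≤ fuel →
    pvLoop fuel rest queue servers clock res =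
      res ++ runP (queue ++ rest) (pvSortI (servers.map (fun t => max clock t))) clock := by
  intro fuel
  induction fuel with
  | zero =>
    intro rest queue servers clock res _ _ _ hM
    exfalso; unfold pvM at hM; omega
  | succ fuel ih =>
    intro rest queue servers clock res hne hpw hq hM
    by_cases hexit : rest = [] ∧ queue = []
    · obtain ⟨rfl, rfl⟩ := hexit
      simp [pvLoop, runP]
    · simp only [pvLoop, if_neg hexit]
      set arrived := rest.takeWhile (fun x => decide (x.1 ≤ clock)) with harr
      set rest' := rest.dropWhile (fun x => decide (x.1 ≤ clock)) with hrest'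
      have hsplit : arrived ++ rest' = rest := List.takeWhile_append_dropWhile
      have hq1 : ∀ x ∈ queue ++ arrived, x.1 ≤ clock := by
        intro x hx
        rcases List.mem_append.1 hx with h | h
        · exact hq x h
        · have := List.mem_takeWhile_imp h; simpa using this
      obtain ⟨hlen2, hq2, ⟨hdrop, hfilt⟩, hrun⟩ :=
        pvServe_eq clock (pvFree servers clock) (queue ++ arrived) servers res
          (fun f hf => mem_pvFree.1 hf) (pvFree_pairwise_ne _ _) hq1
      set r := pvServe (pvFree servers clock) (queue ++ arrived) servers clock res with hr
      set k := min (pvFree servers clock).length (queue ++ arrived).length with hk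
      have hq2len : r.1.length = (queue ++ arrived).length - k := by
        rw [hdrop]; simp
      have hsv2ne : r.2.1 ≠ [] := by
        intro h
        apply hne
        rw [← List.length_eq_zero_iff, ← hlen2, h]
        rfl
      have hpw' : rest'.Pairwise (fun x y => x.1 ≤ y.1) :=
        hpw.sublist (hrest' ▸ List.dropWhile_sublist _)
      have hrest'head : ∀ x xs, rest' = x :: xs → clock < x.1 := by
        intro x xs hx
        have := dropWhile_head_false (hrest' ▸ hx)
        simpa using this
      have hqq : (queue ++ arrived) ++ rest' = queue ++ rest := by
        rw [List.append_assoc, hsplit]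
      have hchain1 : res ++ runP (queue ++ rest)
            (pvSortI (servers.map (fun t => max clock t))) clock
          = r.2.2 ++ runP (r.1 ++ rest') (pvSortI (r.2.1.map (fun t => max clock t))) clock := by
        rw [← hqq]; exact (hrun rest').symm
      -- abbreviations for the measure arithmetic
      have hMold : 4 * rest.length + 2 * queue.length +
          (servers.filter (fun t => decide (clock < t))).length + pvH rest clock + 1 ≤ fuel + 1 := hM
      have hRE : rest.length = arrived.length + rest'.length := by
        rw [← hsplit]; simp
      have hH : pvH rest clock ≤ 1 := by
        cases rest with
        | nil => simp [pvH]
        | cons x xs => simp only [pvH]; split <;> omega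
      have hEH : arrived.length = 0 → rest' = rest := by
        intro hE
        have : arrived = [] := List.length_eq_zero_iff.1 hE
        rw [← hsplit, this, List.nil_append]
      by_cases hadv : r.1 = [] ∨ pvFree r.2.1 clock = []
      · rw [if_pos hadv]
        cases hmin : PySem.List.min? ((match rest' with | [] => ([] : List Int) | x :: _ => [x.1]) ++
            r.2.1.filter (fun t => decide (clock < t))) (fun t => t) with
        | none =>
          have hntnil := (PySem.List.min?_eq_none_iff _ _).1 hmin
          obtain ⟨hmatchnil, hfilnil⟩ := List.append_eq_nil_iff.1 hntnil
          have hre : rest' = [] := by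
            cases hre2 : rest' with
            | nil => rfl
            | cons x xs => rw [hre2] at hmatchnil; simp at hmatchnil
          have hq2nil : r.1 = [] := by
            rcases hadv with h | h
            · exact h
            · exfalso
              have hall := pvFree_nil_iff.1 h
              have hfe : r.2.1.filter (fun t => decide (clock < t)) = r.2.1 := by
                refine List.filter_eq_self.2 ?_
                intro a ha
                obtain ⟨i, hi, rfl⟩ := List.mem_iff_getElem.1 ha
                simpa using hall i hi
              rw [hfe] at hfilnil
              exact hsv2ne hfilnil
          simp only [Option.getD_none]
          rw [hre, hq2nil]
          have hMnew : pvM [] [] r.2.1 clock ≤ fuel := by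
            unfold pvM
            simp only [List.length_nil, pvH]
            have h1 : (r.2.1.filter (fun t => decide (clock < t))).length ≤
                (servers.filter (fun t => decide (clock < t))).length + k := hfilt
            have h2 : k ≤ (queue ++ arrived).length := Nat.min_le_right _ _
            have h3 : 1 ≤ rest.length + queue.length := by
              by_contra hcon
              exact hexit ⟨List.length_eq_zero_iff.1 (by omega),
                List.length_eq_zero_iff.1 (by omega)⟩
            simp only [List.length_append] at h2
            omega
          rw [ih [] [] r.2.1 clock r.2.2 hsv2ne (by simp) (by simp) hMnew]
          rw [hchain1, hre, hq2nil]
        | some m =>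
          simp only [Option.getD_some]
          have hmmem := PySem.List.min?_mem hmin
          have hmlb : ∀ t ∈ ((match rest' with | [] => ([] : List Int) | x :: _ => [x.1]) ++
              r.2.1.filter (fun t => decide (clock < t))), m ≤ t := by
            have := PySem.List.min?_isMin hmin
            simpa using this
          have hcm : clock < m := by
            rcases List.mem_append.1 hmmem with h | h
            · cases hre : rest' with
              | nil => rw [hre] at h; simp at h
              | cons x xs =>
                rw [hre] at h; simp at h; subst h
                exact hrest'head x xs hre
            · have := (List.mem_filter.1 h).2; simpa using this
          -- transfer the spec across the clock advance
          have htrans : runP (r.1 ++ rest') (pvSortI (r.2.1.map (fun t => max clock t))) clock =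
              runP (r.1 ++ rest') (pvSortI (r.2.1.map (fun t => max m t))) m := by
            rcases hadv with hq2nil | hfree2nil
            · rw [hq2nil, List.nil_append]
              cases hre : rest' with
              | nil => rfl
              | cons x xs =>
                have hxm : m ≤ x.1 := by
                  refine hmlb x.1 (List.mem_append.2 (Or.inl ?_))
                  rw [hre]; simp
                refine runP_adv _ _ _ _ _ hcm.le ?_ (pvSortI_pairwise _) (pvSortI_pairwise _) ?_
                · intro y hy
                  rcases List.mem_cons.1 hy with rfl | hy'
                  · exact hxm
                  · have := hpw'
                    rw [hre] at this
                    exact le_trans hxm ((List.pairwise_cons.1 this).1 y hy')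
                · rw [map_max_pvSortI, map_max_pvSortI, List.map_map, List.map_map]
                  congr 1
                  refine List.map_congr_left ?_
                  intro t _
                  simp only [Function.comp_apply]
                  rw [← max_assoc, max_eq_left hcm.le, ← max_assoc, max_self]
            · have hall : ∀ t ∈ r.2.1, clock < t := by
                intro t ht
                obtain ⟨i, hi, rfl⟩ := List.mem_iff_getElem.1 ht
                exact pvFree_nil_iff.1 hfree2nil i hi
              have hmle : ∀ t ∈ r.2.1, m ≤ t := by
                intro t ht
                refine hmlb t (List.mem_append.2 (Or.inr (List.mem_filter.2 ⟨ht, by simpa using hall t ht⟩)))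
              have hid1 : r.2.1.map (fun t => max clock t) = r.2.1 := by
                rw [show r.2.1.map (fun t => max clock t) = r.2.1.map id from
                  List.map_congr_left (fun t ht => max_eq_right (hall t ht).le), List.map_id]
              have hid2 : r.2.1.map (fun t => max m t) = r.2.1 := by
                rw [show r.2.1.map (fun t => max m t) = r.2.1.map id from
                  List.map_congr_left (fun t ht => max_eq_right (hmle t ht)), List.map_id]
              rw [hid1, hid2]
              refine runP_clock_up _ _ _ _ hcm.le ?_
              intro t hthead
              have h1 : t ∈ pvSortI r.2.1 := List.mem_of_mem_head? hthead
              exact hmle t ((pvSortI_perm _).mem_iff.mp h1)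
          -- the measure decreases
          have hMnew : pvM rest' r.1 r.2.1 m ≤ fuel := by
            unfold pvM
            have hF2' : (r.2.1.filter (fun t => decide (m < t))).length ≤
                (r.2.1.filter (fun t => decide (clock < t))).length := filter_mono_le hcm.le
            have hH' : pvH rest' m ≤ 1 := by
              cases hre2 : rest' with
              | nil => simp [pvH]
              | cons x xs => simp only [pvH]; split <;> omega
            have hEH' : arrived.length = 0 → pvH rest' m ≤ pvH rest clock := by
              intro hE
              rw [← hEH hE]
              cases hre : rest' with
              | nil => simp [pvH]
              | cons x xs =>
                have := hrest'head x xs hre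
                simp only [pvH]
                rw [if_pos this]
                split <;> omega
            by_cases hEK : arrived.length = 0 ∧ k = 0
            · obtain ⟨hE, hk0⟩ := hEK
              have hdich : (r.2.1.filter (fun t => decide (m < t))).length + 1 ≤
                  (r.2.1.filter (fun t => decide (clock < t))).length ∨
                  (pvH rest clock = 1 ∧ pvH rest' m = 0) := by
                rcases List.mem_append.1 hmmem with h | h
                · right
                  cases hre : rest' with
                  | nil => rw [hre] at h; simp at h
                  | cons x xs =>
                    rw [hre] at h
                    simp at h
                    constructor
                    · rw [← hEH hE, hre]
                      simp only [pvH]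
                      rw [if_pos (by rw [← h]; exact hcm)]
                    · simp only [pvH]
                      rw [if_neg (by omega)]
                · left
                  have hmem2 := (List.mem_filter.1 h).1
                  have := (List.mem_filter.1 h).2
                  exact filter_lt_strict hmem2 (by simpa using this) le_rfl
              rcases hdich with hd | ⟨hd1, hd2⟩ <;>
                · simp only [hq2len, List.length_append] at *
                  omega
            · simp only [hq2len, List.length_append] at *
              omega
          rw [ih rest' r.1 r.2.1 m r.2.2 hsv2ne hpw'
            (fun x hx => le_trans (hq2 x hx) hcm.le) hMnew]
          rw [hchain1, htrans]
      · rw [if_neg hadv]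
        obtain ⟨hq2ne, hfree2ne⟩ := not_or.1 hadv
        have hk1 : 1 ≤ k := by
          by_contra hcon
          have hk0 : k = 0 := by omega
          have : (pvFree servers clock).length = 0 ∨ (queue ++ arrived).length = 0 := by
            rw [hk] at hk0
            omega
          rcases this with h1 | h1
          · have hfn : pvFree servers clock = [] := List.length_eq_zero_iff.1 h1
            have : r.2.1 = servers := by rw [hr, hfn]; rfl
            rw [this] at hfree2ne
            exact hfree2ne hfn
          · have : r.1 = [] := by
              rw [hdrop, List.length_eq_zero_iff.1 h1]
              simp
            exact hq2ne this
        have hMnew : pvM rest' r.1 r.2.1 clock ≤ fuel := by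
          unfold pvM
          have hH' : pvH rest' clock ≤ 1 := by
            cases hre2 : rest' with
            | nil => simp [pvH]
            | cons x xs => simp only [pvH]; split <;> omega
          have hEH' : arrived.length = 0 → pvH rest' clock = pvH rest clock := by
            intro hE
            rw [← hEH hE]
          by_cases hE0 : arrived.length = 0
          · rw [hEH' hE0] at *
            simp only [hq2len, List.length_append] at *
            omega
          · simp only [hq2len, List.length_append] at *
            omega
        rw [ih rest' r.1 r.2.1 clock r.2.2 hsv2ne hpw' hq2 hMnew]
        exact hchain1.symm

lemma pvGo_eq : ∀ (rem : List (Int × Int × String))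
    (free : List Int) (clock : Int) (res : List (String × Int)),
    free ≠ [] →
    pvGo rem free clock res = res ++ runP rem (pvSortI free) clock := by
  intro rem
  induction rem with
  | nil => intro free clock res _; simp [pvGo, runP]
  | cons x rem ih =>
    rintro free clock res hne
    obtain ⟨a, d, nm⟩ := x
    obtain ⟨t, hp⟩ : ∃ t, PySem.List.min? free (fun x => x) = some t := by
      cases h : PySem.List.min? free (fun x => x) with
      | none => exact absurd ((PySem.List.min?_eq_none_iff _ _).1 h) hne
      | some t => exact ⟨t, rfl⟩
    have hpmem := PySem.List.min?_mem hp
    obtain ⟨i, hidx⟩ : ∃ i, PySem.List.index? free t = some i := by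
      cases h : PySem.List.index? free t with
      | none => exact absurd ((PySem.List.index?_eq_none_iff _ _).1 h) (by simpa using hpmem)
      | some i => exact ⟨i, rfl⟩
    obtain ⟨hi, ht, -⟩ := PySem.List.getElem_of_index?_eq_some hidx
    have hpmin := PySem.List.min?_isMin hp
    have hmin : ∀ s ∈ free, free[i] ≤ s := by
      intro s hs
      rw [ht]
      exact hpmin s hs
    obtain ⟨T, hT1, hT2⟩ := sort_set_of_min hi hmin
      (max (max a clock) free[i] + d)
    have hstart : max (max a clock) free[i] = max a (max clock free[i]) :=
      max_assoc a clock _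
    have hsetne : free.set i (max (max a clock) free[i] + d) ≠ [] := by
      intro h
      have := congrArg List.length h
      simp at this
      exact hne this
    simp only [pvGo, hp, Option.getD_some]
    rw [hidx]
    simp only [Option.getD_some, ← ht]
    rw [ih _ _ _ hsetne, hT2, hT1]
    simp only [runP, ← hstart, List.append_assoc, List.cons_append, List.nil_append]

-- ===== VERDICT (by name: the statement is the Claim_ definition above) =====
theorem simulate_queue_spec : Claim_equal_simulate_queue := by
  intro arrivals n_servers _ hpre
  unfold Spec_simulate_queue simulate_queue simulate_queue_alt
  rcases hpre with rfl | hn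
  · rfl
  · simp only []
    set s := PySem.List.sorted arrivals (fun x => x.1) false with hs
    have hlen : (List.replicate n_servers.toNat (0 : Int)).length = n_servers.toNat := by simp
    have hne : (List.replicate n_servers.toNat (0 : Int)) ≠ [] := by
      intro h
      have := congrArg List.length h
      simp at this
      omega
    have hpw : s.Pairwise (fun x y => x.1 ≤ y.1) :=
      PySem.List.sorted_pairwise arrivals (fun x => x.1)
    have hMi : pvM s [] (List.replicate n_servers.toNat 0) 0 ≤ 4 * s.length + 2 := by
      unfold pvM
      have hf : ((List.replicate n_servers.toNat (0 : Int)).filter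
          (fun t => decide ((0 : Int) < t))).length = 0 := by
        simp
      have hH : pvH s 0 ≤ 1 := by
        cases s with
        | nil => simp [pvH]
        | cons x xs => simp only [pvH]; split <;> omega
      simp only [List.length_nil]
      omega
    rw [pvLoop_eq (4 * s.length + 2) s [] (List.replicate n_servers.toNat 0) 0 [] hne hpw
      (by simp) hMi]
    rw [pvGo_eq s (List.replicate n_servers.toNat 0) 0 [] hne]
    simp only [List.nil_append]
    rw [show (List.replicate n_servers.toNat (0 : Int)).map (fun t => max 0 t) =
      List.replicate n_servers.toNat (0 : Int) by simp]
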